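-- pv_equiv track=rewrite | github.com/Pitterstummes/Kniffel | kniffel_small.py | calc_score_11
-- ===== SOURCE A (Python) =====
-- def calc_score_11(values):
--     # Calculate the score for scoreboard index 11: two pairs
--     pairs = []
--     for value in set(values):
--         if values.count(value) >= 2:
--             pairs.append(value)
--     if len(pairs) >= 2:
--         return sum(pairs) * 2
--     else:
--         return 0
-- ===== SOURCE B (Python) =====
-- def calc_score_11(values):
--     # Sort-then-scan: collect each value once per run of length >= 2.
--     pairs = []
--     prev = None
--     run = 1
--     for v in sorted(values):
--         if v == prev:
--             run += 1
--             if run == 2: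
--                 pairs.append(v)
--         else:
--             prev = v
--             run = 1
--     if len(pairs) >= 2:
--         return sum(pairs) * 2
--     else:
--         return 0
-- ===== Notes on version B (the rewrite author's own statement) =====
-- stated objective: faster
-- what changed: Replaces A's iteration over set(values) with a per-value count() scan by sorting the list once and collecting each pair value in a single run-tracking pass.
import Mathlib
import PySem

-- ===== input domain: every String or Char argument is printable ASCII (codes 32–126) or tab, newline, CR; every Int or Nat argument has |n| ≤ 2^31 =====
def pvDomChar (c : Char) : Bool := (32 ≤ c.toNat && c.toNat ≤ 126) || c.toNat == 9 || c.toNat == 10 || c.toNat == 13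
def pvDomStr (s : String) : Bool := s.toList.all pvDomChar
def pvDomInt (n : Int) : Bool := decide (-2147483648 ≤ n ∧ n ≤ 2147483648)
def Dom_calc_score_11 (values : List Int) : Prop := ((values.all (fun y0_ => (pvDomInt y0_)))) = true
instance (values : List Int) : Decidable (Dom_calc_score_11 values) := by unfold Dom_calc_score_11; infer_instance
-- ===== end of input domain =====

-- B replaces A's iterate-set-and-count-each-value pass by a sort-then-single-scan run grouping (objective: alternative).

-- ===== PORT A =====
def calc_score_11 (values : List Int) : Int :=
  let pairs : List Int :=
    (PySem.Set.ofList values).foldl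
      (fun acc value => if 2 ≤ values.count value then acc ++ [value] else acc) []
  if 2 ≤ pairs.length then pairs.sum * 2 else 0

-- ===== PORT B =====
-- one loop iteration of B: state = (pairs, prev, run)
def pvStepB (st : List Int × Option Int × Int) (v : Int) : List Int × Option Int × Int :=
  if some v = st.2.1 then
    let run := st.2.2 + 1
    (if run = 2 then st.1 ++ [v] else st.1, st.2.1, run)
  else
    (st.1, some v, 1)

def calc_score_11_alt (values : List Int) : Int :=
  let st := (PySem.List.sorted values (fun x => x) false).foldl pvStepB ([], none, 1)
  if 2 ≤ st.1.length then st.1.sum * 2 else 0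

-- ===== PRECONDITION & SPEC =====
def Spec_calc_score_11 (values : List Int) (out : Int) : Prop := out = calc_score_11_alt values
instance (values : List Int) (out : Int) : Decidable (Spec_calc_score_11 values out) := by unfold Spec_calc_score_11; infer_instance

-- ===== CLAIM (what is proved, stated in full; the proofs are below) =====
def Claim_equal_calc_score_11 : Prop := ∀ (values : List Int), Dom_calc_score_11 values → Spec_calc_score_11 values (calc_score_11 values)

-- ===== LEMMAS AND PROOFS =====

/-- Invariant lemma for B's scan over a sorted tail `s`, state `(ps, some p, r)`. -/
theorem pvScan_spec (s : List Int) (hs : s.Pairwise (· ≤ ·)) :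
    ∀ (ps : List Int) (p r : Int),
      (∀ v ∈ s, p ≤ v) → 1 ≤ r → ps.Nodup →
      (p ∈ ps ↔ 2 ≤ r) → (∀ v ∈ ps, v ≤ p) → (∀ v ∈ ps, v ≠ p → v ∉ s) →
      ((s.foldl pvStepB (ps, some p, r)).1.Nodup ∧
        ∀ v, v ∈ (s.foldl pvStepB (ps, some p, r)).1 ↔
          (if v = p then 2 ≤ r.toNat + s.count v
           else (v ∈ ps ∨ 2 ≤ s.count v))) := by
  induction s with
  | nil =>
    intro ps p r _ hr hnd hps _ _
    refine ⟨hnd, fun v => ?_⟩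
    simp only [List.foldl_nil, List.count_nil]
    by_cases hv : v = p
    · rw [if_pos hv]; subst hv
      constructor
      · intro h; have := hps.mp h; omega
      · intro h; exact hps.mpr (by omega)
    · rw [if_neg hv]
      exact ⟨fun h => Or.inl h, fun h => by rcases h with h | h; exact h; omega⟩
  | cons x t ih =>
    intro ps p r hle hr hnd hps hub hnotin
    have hle' : ∀ v ∈ t, x ≤ v := fun v hv => (List.pairwise_cons.mp hs).1 v hv
    have ht : t.Pairwise (· ≤ ·) := (List.pairwise_cons.mp hs).2
    by_cases hxp : x = p
    · subst hxp
      -- the run continues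
      have hstep : pvStepB (ps, some x, r) x
          = (if r + 1 = 2 then ps ++ [x] else ps, some x, r + 1) := by
        simp [pvStepB]
      rw [List.foldl_cons, hstep]
      have hnd' : (if r + 1 = 2 then ps ++ [x] else ps).Nodup := by
        split
        · next h2 =>
          have hxps : x ∉ ps := fun hm => by have := hps.mp hm; omega
          refine List.Nodup.append hnd (List.nodup_singleton x) ?_
          intro a ha hb
          simp only [List.mem_singleton] at hb
          subst hb; exact hxps ha
        · exact hnd
      have hmem' : x ∈ (if r + 1 = 2 then ps ++ [x] else ps) ↔ 2 ≤ r + 1 := by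
        split
        · next h2 => simp; omega
        · next h2 => rw [hps]; omega
      have hub' : ∀ v ∈ (if r + 1 = 2 then ps ++ [x] else ps), v ≤ x := by
        intro v hv; split at hv
        · rcases List.mem_append.mp hv with h | h
          · exact hub v h
          · simp at h; omega
        · exact hub v hv
      have hni' : ∀ v ∈ (if r + 1 = 2 then ps ++ [x] else ps), v ≠ x → v ∉ t := by
        intro v hv hvx
        have hv' : v ∈ ps := by
          split at hv
          · rcases List.mem_append.mp hv with h | h
            · exact h
            · simp at h; exact absurd h hvx
          · exact hv
        exact fun hmt => hnotin v hv' hvx (List.mem_cons_of_mem _ hmt)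
      obtain ⟨hN, hM⟩ := ih ht _ x (r + 1) hle' (by omega) hnd' hmem' hub' hni'
      refine ⟨hN, fun v => ?_⟩
      rw [hM v]
      by_cases hv : v = x
      · subst hv
        rw [if_pos rfl, if_pos rfl]
        simp only [List.count_cons_self]
        omega
      · rw [if_neg hv, if_neg hv]
        simp only [List.count_cons, beq_iff_eq, if_neg (Ne.symm hv), Nat.add_zero]
        constructor
        · rintro (h | h)
          · left
            split at h
            · rcases List.mem_append.mp h with h' | h'
              · exact h'
              · simp at h'; exact absurd h' hv
            · exact h
          · exact Or.inr h
        · rintro (h | h)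
          · left; split
            · exact List.mem_append.mpr (Or.inl h)
            · exact h
          · exact Or.inr h
    · -- a new run starts at x
      have hpx : p < x := lt_of_le_of_ne (hle x (List.mem_cons_self)) (fun h => hxp h.symm)
      have hstep : pvStepB (ps, some p, r) x = (ps, some x, 1) := by
        simp [pvStepB, hxp]
      rw [List.foldl_cons, hstep]
      have hxps : x ∉ ps := fun hm => absurd (hub x hm) (by omega)
      have hpt : p ∉ t := fun hm => absurd (hle' p hm) (by omega)
      have hni' : ∀ v ∈ ps, v ≠ x → v ∉ t := by
        intro v hv hvx
        by_cases hvp : v = p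
        · subst hvp; exact hpt
        · exact fun hmt => hnotin v hv hvp (List.mem_cons_of_mem _ hmt)
      obtain ⟨hN, hM⟩ := ih ht ps x 1 hle' (by omega) hnd
        (by simp [hxps]) (fun v hv => le_of_lt (lt_of_le_of_lt (hub v hv) hpx)) hni'
      refine ⟨hN, fun v => ?_⟩
      rw [hM v]
      by_cases hvx : v = x
      · subst hvx
        rw [if_pos rfl, if_neg hxp]
        simp only [List.count_cons_self]
        constructor
        · intro h; right; omega
        · rintro (h | h)
          · exact absurd h hxps
          · omega
      · rw [if_neg hvx]
        simp only [List.count_cons, beq_iff_eq, if_neg (Ne.symm hvx), Nat.add_zero]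
        by_cases hvp : v = p
        · subst hvp
          rw [if_pos rfl]
          have h0 : t.count v = 0 := List.count_eq_zero.mpr hpt
          rw [h0]
          constructor
          · rintro (h | h)
            · have := hps.mp h; omega
            · omega
          · intro h; left; exact hps.mpr (by omega)
        · rw [if_neg hvp]

/-- B's collected pairs over the sorted list: nodup, membership = multiplicity ≥ 2. -/
theorem pvPairsB_spec (values : List Int) :
    (((PySem.List.sorted values (fun x => x) false).foldl pvStepB ([], none, 1)).1.Nodup ∧
      ∀ v, v ∈ ((PySem.List.sorted values (fun x => x) false).foldl pvStepB ([], none, 1)).1 ↔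
        2 ≤ values.count v) := by
  have hperm : (PySem.List.sorted values (fun x => x) false).Perm values :=
    PySem.List.sorted_perm values (fun x => x) false
  have hpw : (PySem.List.sorted values (fun x => x) false).Pairwise (· ≤ ·) := by
    simpa using PySem.List.sorted_pairwise values (fun x => x)
  rcases hseq : PySem.List.sorted values (fun x => x) false with _ | ⟨x, t⟩
  · have hnil : values = [] := by
      have := hperm; rw [hseq] at this; exact (List.Perm.nil_eq this).symm
    subst hnil
    simp
  · rw [hseq] at hperm hpw
    have hle' : ∀ v ∈ t, x ≤ v := fun v hv => (List.pairwise_cons.mp hpw).1 v hv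
    have ht : t.Pairwise (· ≤ ·) := (List.pairwise_cons.mp hpw).2
    have hstep : pvStepB ([], none, 1) x = ([], some x, 1) := by simp [pvStepB]
    rw [List.foldl_cons, hstep]
    obtain ⟨hN, hM⟩ := pvScan_spec t ht [] x 1 hle' (by omega) List.nodup_nil
      (by simp) (by simp) (by simp)
    refine ⟨hN, fun v => ?_⟩
    rw [hM v, ← List.Perm.count_eq hperm v]
    by_cases hvx : v = x
    · subst hvx
      rw [if_pos rfl]
      simp only [List.count_cons_self]
      omega
    · rw [if_neg hvx]
      simp only [List.count_cons, beq_iff_eq, if_neg (Ne.symm hvx), Nat.add_zero]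
      simp

/-- A's collected pairs: nodup, same membership. -/
theorem pvPairsA_spec (values : List Int) :
    (((PySem.Set.ofList values).foldl
        (fun acc value => if 2 ≤ values.count value then acc ++ [value] else acc) []).Nodup ∧
      ∀ v, v ∈ ((PySem.Set.ofList values).foldl
        (fun acc value => if 2 ≤ values.count value then acc ++ [value] else acc) []) ↔
        2 ≤ values.count v) := by
  rw [PySem.List.foldl_append_ite_eq_filter]
  constructor
  · exact (PySem.Set.nodup_ofList values).filter _
  · intro v
    simp only [List.nil_append, List.mem_filter, PySem.Set.mem_ofList, decide_eq_true_eq]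
    constructor
    · exact fun h => h.2
    · intro h
      exact ⟨List.count_pos_iff.mp (by omega), h⟩

/-- The two pair lists are permutations of each other. -/
theorem pvPairs_perm (values : List Int) :
    ((PySem.Set.ofList values).foldl
        (fun acc value => if 2 ≤ values.count value then acc ++ [value] else acc) []).Perm
      ((PySem.List.sorted values (fun x => x) false).foldl pvStepB ([], none, 1)).1 := by
  obtain ⟨hAn, hAm⟩ := pvPairsA_spec values
  obtain ⟨hBn, hBm⟩ := pvPairsB_spec values
  exact (List.perm_ext_iff_of_nodup hAn hBn).mpr (fun v => (hAm v).trans (hBm v).symm)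

-- ===== VERDICT (by name: the statement is the Claim_ definition above) =====
theorem calc_score_11_spec : Claim_equal_calc_score_11 := by
  intro values _
  unfold Spec_calc_score_11 calc_score_11 calc_score_11_alt
  have hperm := pvPairs_perm values
  simp only [hperm.length_eq, hperm.sum_eq]
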